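-- pv_equiv track=rewrite | github.com/pypi-data/pypi-mirror-26 | packages/transfer-client/transfer-client-0.2.0.tar.gz/transfer-client-0.2.0/transfer_client/local.py | abs_arc
-- ===== SOURCE A (Python) =====
-- def abs_arc(paths):
--     """Strip the common path of a list of absolute paths."""
--     path_lists = map(lambda x: x.split('/')[:-1], paths)
--
--     trim = 0
--     for path in map(set, zip(*path_lists)):
--         if len(path) > 1:
--             break
--         trim += len(path.pop()) + 1
--
--     return map(lambda x: x[trim:], paths)
-- ===== SOURCE B (Python) =====
-- def abs_arc(paths):
--     """Strip the common path of a list of absolute paths."""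
--     prefix = None
--     for p in paths:
--         comps = p.split('/')[:-1]
--         if prefix is None:
--             prefix = comps
--         else:
--             keep = []
--             for a, b in zip(prefix, comps):
--                 if a != b:
--                     break
--                 keep.append(a)
--             prefix = keep
--     trim = 0 if prefix is None else sum(len(c) + 1 for c in prefix)
--     return map(lambda x: x[trim:], paths)
-- ===== Notes on version B (the rewrite author's own statement) =====
-- stated objective: simpler
-- what changed: Replaces A's transpose (zip(*lists)) plus per-column set cardinality test by a single row-wise fold that maintains the common leading component prefix via pairwise zip-and-compare, then sums its component lengths.
import Mathlib
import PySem

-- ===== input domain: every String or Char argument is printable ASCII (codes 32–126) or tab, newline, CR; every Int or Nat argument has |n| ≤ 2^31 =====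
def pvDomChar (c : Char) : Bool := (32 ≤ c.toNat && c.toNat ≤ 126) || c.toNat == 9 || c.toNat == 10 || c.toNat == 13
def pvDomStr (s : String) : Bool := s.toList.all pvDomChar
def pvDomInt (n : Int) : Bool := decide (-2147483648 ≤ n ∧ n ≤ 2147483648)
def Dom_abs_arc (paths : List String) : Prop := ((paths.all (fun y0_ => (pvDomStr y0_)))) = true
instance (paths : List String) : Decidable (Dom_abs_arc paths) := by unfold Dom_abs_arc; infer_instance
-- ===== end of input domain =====

-- B replaces A's transpose + per-column set test by one row-wise pass maintaining the common
-- component prefix (objective: simpler). Both Pythons return a lazy map over the argument;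
-- the equivalence proved here is about the returned sequence of strings.

-- ===== PORT A =====
-- zip(*path_lists): columns up to the shortest row; hand-ported (variadic zip), exact for lists.
def pyZipStar : List (List String) → List (List String)
  | [] => []
  | l :: rest =>
    if (l :: rest).all (fun m => !m.isEmpty) then
      ((l :: rest).map (fun m => m.headD "")) :: pyZipStar (l.tail :: rest.map List.tail)
    else []
termination_by ls => (ls.headD []).length
decreasing_by
  simp_all
  cases l with
  | nil => simp_all
  | cons a t => simp

-- the 'for path in map(set, ...)' loop with its break; set.pop() on the size-1 set is its head.
def absArcLoop : List (List String) → Int → Int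
  | [], trim => trim
  | col :: rest, trim =>
    let s : PySem.Set String := PySem.Set.ofList col
    if 1 < PySem.Set.len s then trim
    else absArcLoop rest (trim + PySem.Str.len (s.headD "") + 1)

def abs_arc (paths : List String) : List String :=
  -- x.split('/')[:-1]; sep "/" is non-empty so split? returns some
  let pathLists := paths.map (fun x =>
    PySem.List.slice ((PySem.Str.split? x "/").getD []) none (some (-1)))
  let trim := absArcLoop (pyZipStar pathLists) 0
  paths.map (fun x => PySem.Str.slice x (some trim) none)

-- ===== PORT B =====
-- the inner 'for a, b in zip(prefix, comps): if a != b: break; keep.append(a)'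
def lcpKeep : List String → List String → List String → List String
  | keep, a :: ps, b :: cs => if a ≠ b then keep else lcpKeep (keep ++ [a]) ps cs
  | keep, _, _ => keep

def abs_arc_alt (paths : List String) : List String :=
  let prefix? : Option (List String) := paths.foldl
    (fun prefix? p =>
      let comps := ((PySem.Str.split? p "/").getD []).dropLast
      match prefix? with
      | none => some comps
      | some pre => some (lcpKeep [] pre comps))
    none
  let trim : Int := match prefix? with
    | none => 0
    | some pre => (pre.map (fun c => PySem.Str.len c + 1)).sum
  paths.map (fun x => PySem.Str.slice x (some trim) none)

-- ===== PRECONDITION & SPEC =====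
def Spec_abs_arc (paths : List String) (out : List String) : Prop := out = abs_arc_alt paths
instance (paths : List String) (out : List String) : Decidable (Spec_abs_arc paths out) := by unfold Spec_abs_arc; infer_instance

-- ===== CLAIM (what is proved, stated in full; the proofs are below) =====
def Claim_equal_abs_arc : Prop := ∀ (paths : List String), Dom_abs_arc paths → Spec_abs_arc paths (abs_arc paths)

-- ===== LEMMAS AND PROOFS =====

-- mathematical two-list longest common prefix
def lcp2 : List String → List String → List String
  | a :: ps, b :: cs => if a = b then a :: lcp2 ps cs else []
  | _, _ => []

def sumLen (pre : List String) : Int := (pre.map (fun c => PySem.Str.len c + 1)).sum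

lemma lcpKeep_eq (pre cs : List String) : ∀ keep, lcpKeep keep pre cs = keep ++ lcp2 pre cs := by
  induction pre generalizing cs with
  | nil => intro keep; cases cs <;> simp [lcpKeep, lcp2]
  | cons a ps ih =>
    intro keep
    cases cs with
    | nil => simp [lcpKeep, lcp2]
    | cons b cs' =>
      by_cases h : a = b
      · simp [lcpKeep, lcp2, h, ih]
      · simp [lcpKeep, lcp2, h]

lemma foldl_lcp2_nil (rest : List (List String)) : rest.foldl lcp2 [] = [] := by
  induction rest with
  | nil => rfl
  | cons m r ih => simpa [lcp2] using ih

lemma foldl_lcp2_has_nil (rest : List (List String)) (acc : List String)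
    (h : [] ∈ rest) : rest.foldl lcp2 acc = [] := by
  induction rest generalizing acc with
  | nil => simp at h
  | cons m r ih =>
    rcases List.mem_cons.1 h with h | h
    · subst h; cases acc <;> simp [lcp2, foldl_lcp2_nil]
    · exact ih _ h

lemma foldl_lcp2_eq_nil (a : String) (l' : List String) (rest : List (List String))
    (h : ∃ m ∈ rest, m.head? ≠ some a) : rest.foldl lcp2 (a :: l') = [] := by
  induction rest generalizing a l' with
  | nil => simp at h
  | cons m r ih =>
    rcases h with ⟨m', hm', hne⟩
    rcases List.mem_cons.1 hm' with h1 | h1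
    · subst h1
      cases m' with
      | nil => simp [lcp2, foldl_lcp2_nil]
      | cons b t =>
        have hba : ¬ a = b := by simpa [eq_comm] using hne
        simp [lcp2, hba, foldl_lcp2_nil]
    · cases m with
      | nil => simp [lcp2, foldl_lcp2_nil]
      | cons b t =>
        by_cases hab : a = b
        · subst hab
          simpa [lcp2] using ih a (lcp2 l' t) ⟨m', h1, hne⟩
        · simp [lcp2, hab, foldl_lcp2_nil]

lemma foldl_lcp2_cons (a : String) (l' : List String) (rest : List (List String))
    (h : ∀ m ∈ rest, ∃ t, m = a :: t) :
    rest.foldl lcp2 (a :: l') = a :: (rest.map List.tail).foldl lcp2 l' := by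
  induction rest generalizing l' with
  | nil => rfl
  | cons m r ih =>
    obtain ⟨t, rfl⟩ := h m (by simp)
    simpa [lcp2] using ih (lcp2 l' t) (fun m hm => h m (by simp [hm]))

lemma ofList_all_eq (a : String) (xs : List String) (h : ∀ x ∈ xs, x = a) :
    PySem.Set.ofList (a :: xs) = [a] := by
  have key : ∀ ys : List String, (∀ x ∈ ys, x = a) → ys.foldl PySem.Set.add [a] = [a] := by
    intro ys
    induction ys with
    | nil => intro _; rfl
    | cons y r ih =>
      intro hy
      have hya : y = a := hy y (by simp)
      have : PySem.Set.add [a] y = [a] := by rw [hya]; simp [PySem.Set.add, PySem.Set.contains]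
      rw [List.foldl_cons, this]
      exact ih (fun x hx => hy x (by simp [hx]))
  have : PySem.Set.ofList (a :: xs) = xs.foldl PySem.Set.add (PySem.Set.add PySem.Set.empty a) := by
    simp [PySem.Set.ofList_eq_foldl]
  rw [this]
  have : PySem.Set.add PySem.Set.empty a = [a] := by simp [PySem.Set.add, PySem.Set.empty, PySem.Set.contains]
  rw [this]
  exact key xs h

lemma one_lt_length_of_two_mem (l : List String) (a b : String)
    (ha : a ∈ l) (hb : b ∈ l) (hab : a ≠ b) : 1 < l.length := by
  rcases l with _ | ⟨x, _ | ⟨y, t⟩⟩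
  · simp at ha
  · simp at ha hb; exact absurd (ha.trans hb.symm) hab
  · simp

lemma one_lt_len_ofList (a b : String) (xs : List String)
    (ha : a ∈ xs) (hb : b ∈ xs) (hab : a ≠ b) : 1 < PySem.Set.len (PySem.Set.ofList xs) := by
  have ha' : a ∈ PySem.Set.ofList xs := (PySem.Set.mem_ofList xs a).2 ha
  have hb' : b ∈ PySem.Set.ofList xs := (PySem.Set.mem_ofList xs b).2 hb
  have hlen := one_lt_length_of_two_mem _ a b ha' hb' hab
  have : PySem.Set.len (PySem.Set.ofList xs) = ((PySem.Set.ofList xs).length : Int) := by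
    simp [PySem.Set.len]
  omega

lemma absArcLoop_main (l : List String) (rest : List (List String)) (t : Int) :
    absArcLoop (pyZipStar (l :: rest)) t = t + sumLen (rest.foldl lcp2 l) := by
  induction l generalizing rest t with
  | nil =>
    have : pyZipStar ([] :: rest) = [] := by simp [pyZipStar]
    rw [this]
    simp [absArcLoop, foldl_lcp2_nil, sumLen]
  | cons a l' ih =>
    by_cases hnil : [] ∈ rest
    · have : pyZipStar ((a :: l') :: rest) = [] := by
        rw [pyZipStar]
        have : ¬ ((a :: l') :: rest).all (fun m => !m.isEmpty) = true := by
          simp only [List.all_eq_true]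
          intro hAll
          have := hAll [] (List.mem_cons_of_mem _ hnil)
          simp at this
        simp [this]
      rw [this]
      simp [absArcLoop, foldl_lcp2_has_nil rest _ hnil, sumLen]
    · have hall : ((a :: l') :: rest).all (fun m => !m.isEmpty) = true := by
        simp [List.all_eq_true]
        intro m hm hmnil
        exact hnil (hmnil ▸ hm)
      rw [pyZipStar, if_pos hall]
      by_cases hheads : ∀ m ∈ rest, m.head? = some a
      · -- all heads equal: column is all a
        have hcons : ∀ m ∈ rest, ∃ tl, m = a :: tl := by
          intro m hm
          cases m with
          | nil => exact absurd hm hnil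
          | cons x tl => exact ⟨tl, by have := hheads _ hm; simp at this; rw [this]⟩
        have hcol : ((a :: l') :: rest).map (fun m => m.headD "") = a :: rest.map (fun m => m.headD "") := by
          simp
        have hcoleq : ∀ x ∈ rest.map (fun m => m.headD ""), x = a := by
          intro x hx
          simp at hx
          obtain ⟨m, hm, rfl⟩ := hx
          obtain ⟨tl, rfl⟩ := hcons m hm
          rfl
        rw [hcol]
        rw [absArcLoop]
        simp only [ofList_all_eq a _ hcoleq]
        have h1 : ¬ (1 < PySem.Set.len ([a] : PySem.Set String)) := by
          simp [PySem.Set.len]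
        rw [if_neg h1]
        simp only [List.tail_cons]
        rw [ih (rest.map List.tail) (t + PySem.Str.len (List.headD [a] "") + 1)]
        rw [foldl_lcp2_cons a l' rest hcons]
        simp [sumLen]
        ring
      · push Not at hheads
        obtain ⟨m, hm, hne⟩ := hheads
        obtain ⟨b, tl, rfl⟩ : ∃ b tl, m = b :: tl := by
          cases m with
          | nil => exact absurd hm hnil
          | cons b tl => exact ⟨b, tl, rfl⟩
        have hba : b ≠ a := by simpa using hne
        rw [absArcLoop]
        have hmem_a : a ∈ ((a :: l') :: rest).map (fun m => m.headD "") := by simp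
        have hmem_b : b ∈ ((a :: l') :: rest).map (fun m => m.headD "") := by
          simp only [List.map_cons, List.mem_cons, List.mem_map]
          exact Or.inr ⟨_, hm, rfl⟩
        have := one_lt_len_ofList a b _ hmem_a hmem_b (Ne.symm hba)
        rw [if_pos this]
        rw [foldl_lcp2_eq_nil a l' rest ⟨_, hm, by simpa using hne⟩]
        simp [sumLen]

lemma foldB (f : String → List String) (ps : List String) (pre : List String) :
    ps.foldl (fun prefix? p =>
        match prefix? with
        | none => some (f p)
        | some pre => some (lcpKeep [] pre (f p))) (some pre)
      = some ((ps.map f).foldl lcp2 pre) := by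
  induction ps generalizing pre with
  | nil => rfl
  | cons p r ih => simpa [lcpKeep_eq] using ih (lcp2 pre (f p))

-- ===== VERDICT (by name: the statement is the Claim_ definition above) =====
theorem abs_arc_spec : Claim_equal_abs_arc := by
  intro paths _
  unfold Spec_abs_arc abs_arc abs_arc_alt
  cases paths with
  | nil => rfl
  | cons p ps =>
    simp only [List.map_cons, List.foldl_cons, PySem.List.slice_to_neg_one]
    rw [foldB (fun x => ((PySem.Str.split? x "/").getD []).dropLast) ps]
    rw [absArcLoop_main]
    simp [sumLen]
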